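-- pv_equiv track=rewrite | github.com/WyoHutch/ExerciseOne | CardFuncs.py | get_cards
-- ===== SOURCE A (Python) =====
-- def get_cards(num_decks):
--     suits = ["C", "D", "H", "S"];
--     face_cards = ["B", "J", "Q", "T", "Z"];
--     cards = [];
--     card_deck = [];
--
--     for i in range(2, 10):
--         cards.append(str(i))
--     cards.extend(face_cards)
--
--     for i in cards:
--         for j in suits:
--             card_deck.append(i + j);
--
--     card_list = [];
--     for i in range(num_decks):
--         card_list.extend(card_deck)
--
--     card_list.sort();
--
--     for i in range(num_decks * 32, num_decks * 36):
--         temp = card_list.pop(i)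
--         card_list.insert(i, temp.replace("B", "10"));
--     for i in range(num_decks * 44, num_decks * 48):
--         temp = card_list.pop(i)
--         card_list.insert(i, temp.replace("T", "K"));
--     for i in range(num_decks * 48, num_decks * 52):
--         temp = card_list.pop(i)
--         card_list.insert(i, temp.replace("Z", "A"));
--
--     return card_list
-- ===== SOURCE B (Python) =====
-- _LABELS = ["2C", "2D", "2H", "2S", "3C", "3D", "3H", "3S", "4C", "4D", "4H", "4S",
--            "5C", "5D", "5H", "5S", "6C", "6D", "6H", "6S", "7C", "7D", "7H", "7S",
--            "8C", "8D", "8H", "8S", "9C", "9D", "9H", "9S", "10C", "10D", "10H", "10S",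
--            "JC", "JD", "JH", "JS", "QC", "QD", "QH", "QS", "KC", "KD", "KH", "KS",
--            "AC", "AD", "AH", "AS"]
--
-- def get_cards(num_decks):
--     # emit the fixed sorted 52-label order directly, num_decks copies of each label
--     return [lab for lab in _LABELS for _ in range(num_decks)]
-- ===== Notes on version B (the rewrite author's own statement) =====
-- stated objective: faster
-- what changed: B hard-codes the final sorted deck-label order (with 10/K/A already substituted) and emits num_decks copies of each label directly, replacing A's build-multiply-sort-then-pop/insert pipeline.
import Mathlib
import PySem

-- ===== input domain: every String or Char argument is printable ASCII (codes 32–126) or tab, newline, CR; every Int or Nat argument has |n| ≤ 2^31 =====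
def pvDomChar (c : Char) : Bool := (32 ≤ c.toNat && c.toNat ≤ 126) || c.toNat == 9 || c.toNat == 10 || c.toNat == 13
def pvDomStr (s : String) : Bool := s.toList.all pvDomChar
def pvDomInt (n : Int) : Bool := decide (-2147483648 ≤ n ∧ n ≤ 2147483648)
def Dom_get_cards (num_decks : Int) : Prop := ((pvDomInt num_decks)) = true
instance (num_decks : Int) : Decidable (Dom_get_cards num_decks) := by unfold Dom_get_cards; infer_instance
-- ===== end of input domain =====

-- B replaces A's build/multiply/sort/pop-insert pipeline by directly emitting the fixed
-- sorted deck-label order with the 10/K/A substitutions pre-applied (objective: faster).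

-- ===== PORT A =====
-- 'temp = card_list.pop(i); card_list.insert(i, temp.replace(old, new))' — one loop body of A.
-- The 'none' branch is where Python's pop would raise IndexError; it is never reached
-- (every index A generates is in range), so A is total.
def pvSubstStep (old new : String) (lst : List String) (i : Int) : List String :=
  match PySem.List.pop? lst i with
  | some (t, rest) => PySem.List.insert rest i (PySem.Str.replace t old new)
  | none => lst

def get_cards (num_decks : Int) : List String :=
  let suits : List String := ["C", "D", "H", "S"]
  let face_cards : List String := ["B", "J", "Q", "T", "Z"]
  let cards : List String := []
  let card_deck : List String := []
  let cards := (PySem.List.pyRange 2 10 1).foldl (fun acc i => acc ++ [PySem.Int.toStr i]) cards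
  let cards := cards ++ face_cards
  let card_deck := cards.foldl (fun cd i => suits.foldl (fun cd2 j => cd2 ++ [i ++ j]) cd) card_deck
  let card_list : List String := []
  let card_list := (PySem.List.pyRange 0 num_decks 1).foldl (fun acc _ => acc ++ card_deck) card_list
  let card_list := PySem.List.sorted card_list (fun x => x) false
  let card_list := (PySem.List.pyRange (num_decks * 32) (num_decks * 36) 1).foldl (pvSubstStep "B" "10") card_list
  let card_list := (PySem.List.pyRange (num_decks * 44) (num_decks * 48) 1).foldl (pvSubstStep "T" "K") card_list
  let card_list := (PySem.List.pyRange (num_decks * 48) (num_decks * 52) 1).foldl (pvSubstStep "Z" "A") card_list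
  card_list

-- ===== PORT B =====
def pvLabels : List String :=
  ["2C", "2D", "2H", "2S", "3C", "3D", "3H", "3S", "4C", "4D", "4H", "4S",
   "5C", "5D", "5H", "5S", "6C", "6D", "6H", "6S", "7C", "7D", "7H", "7S",
   "8C", "8D", "8H", "8S", "9C", "9D", "9H", "9S", "10C", "10D", "10H", "10S",
   "JC", "JD", "JH", "JS", "QC", "QD", "QH", "QS", "KC", "KD", "KH", "KS",
   "AC", "AD", "AH", "AS"]

def get_cards_alt (num_decks : Int) : List String :=
  pvLabels.flatMap (fun lab => (PySem.List.pyRange 0 num_decks 1).map (fun _ => lab))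

-- ===== PRECONDITION & SPEC =====
def Spec_get_cards (num_decks : Int) (out : List String) : Prop := out = get_cards_alt num_decks
instance (num_decks : Int) (out : List String) : Decidable (Spec_get_cards num_decks out) := by unfold Spec_get_cards; infer_instance

-- ===== CLAIM (what is proved, stated in full; the proofs are below) =====
def Claim_equal_get_cards : Prop := ∀ (num_decks : Int), Dom_get_cards num_decks → Spec_get_cards num_decks (get_cards num_decks)

-- ===== LEMMAS AND PROOFS =====

-- the five rank blocks of the sorted single deck, before substitution
def pvN32 : List String :=
  ["2C", "2D", "2H", "2S", "3C", "3D", "3H", "3S", "4C", "4D", "4H", "4S",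
   "5C", "5D", "5H", "5S", "6C", "6D", "6H", "6S", "7C", "7D", "7H", "7S",
   "8C", "8D", "8H", "8S", "9C", "9D", "9H", "9S"]
def pvLB : List String := ["BC", "BD", "BH", "BS"]
def pvJQ : List String := ["JC", "JD", "JH", "JS", "QC", "QD", "QH", "QS"]
def pvLT : List String := ["TC", "TD", "TH", "TS"]
def pvLZ : List String := ["ZC", "ZD", "ZH", "ZS"]
def pvL52 : List String := pvN32 ++ (pvLB ++ (pvJQ ++ (pvLT ++ pvLZ)))
def pvLB10 : List String := ["10C", "10D", "10H", "10S"]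
def pvLK : List String := ["KC", "KD", "KH", "KS"]
def pvLA : List String := ["AC", "AD", "AH", "AS"]
def pvPre44 : List String := pvN32 ++ (pvLB10 ++ pvJQ)
def pvPre48 : List String := pvPre44 ++ pvLK

-- m copies of each label, in label order
def pvRep (m : Nat) (L : List String) : List String := L.flatMap (fun lab => List.replicate m lab)

theorem pvRep_append (m : Nat) (L1 L2 : List String) :
    pvRep m (L1 ++ L2) = pvRep m L1 ++ pvRep m L2 := by
  simp [pvRep]

theorem pvRep_length (m : Nat) (L : List String) : (pvRep m L).length = L.length * m := by
  induction L with
  | nil => simp [pvRep]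
  | cons a L ih => simp [pvRep, Nat.succ_mul] at ih ⊢; omega

theorem pvRep_map (m : Nat) (L : List String) (f : String → String) :
    (pvRep m L).map f = pvRep m (L.map f) := by
  induction L with
  | nil => simp [pvRep]
  | cons a L ih => simp [pvRep] at ih ⊢; exact ih

theorem pvFlatMapConst {α β : Type} (l : List α) (d : List β) :
    l.flatMap (fun _ => d) = (List.replicate l.length d).flatten := by
  induction l with
  | nil => simp
  | cons a l ih => simp [List.replicate_succ, ih]

theorem pvPermConsFlat {α : Type} (L : List α) (g : α → List α) :
    (L.flatMap (fun x => x :: g x)).Perm (L ++ L.flatMap g) := by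
  induction L with
  | nil => simp
  | cons a L ih =>
    simp only [List.flatMap_cons, List.cons_append]
    refine List.Perm.cons a ?_
    exact (List.Perm.append_left _ ih).trans (List.perm_append_comm_assoc _ _ _)

theorem pvRep_perm_flatten (m : Nat) (L : List String) :
    (pvRep m L).Perm ((List.replicate m L).flatten) := by
  induction m with
  | zero => simp [pvRep]
  | succ m ih =>
    have h1 : pvRep (m + 1) L = L.flatMap (fun x => x :: List.replicate m x) := by
      simp [pvRep, List.replicate_succ]
    rw [h1, List.replicate_succ, List.flatten_cons]
    exact (pvPermConsFlat L _).trans (List.Perm.append_left L ih)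

theorem pvRep_pairwise_le (m : Nat) (L : List String) (h : L.Pairwise (· < ·)) :
    (pvRep m L).Pairwise (fun a b : String => a ≤ b) := by
  induction L with
  | nil => simp [pvRep]
  | cons a L ih =>
    have hrep : pvRep m (a :: L) = List.replicate m a ++ pvRep m L := by
      simp [pvRep]
    rw [hrep, List.pairwise_append]
    refine ⟨?_, ih h.of_cons, ?_⟩
    · exact List.pairwise_replicate.mpr (Or.inr (le_refl a))
    · intro x hx y hy
      obtain rfl := List.eq_of_mem_replicate hx
      obtain ⟨b, hb, hyb⟩ := List.mem_flatMap.mp hy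
      obtain rfl := List.eq_of_mem_replicate hyb
      exact le_of_lt (List.rel_of_pairwise_cons h hb)

theorem pvL52_lt : pvL52.Pairwise (· < ·) := by
  have h : pvL52.Pairwise (fun a b : String => a.toList < b.toList) := by decide
  exact h.imp (fun hab => String.lt_iff_toList_lt.mpr hab)

theorem pvSubstLoop (old new : String) (q p r : List String) :
    (PySem.List.pyRange (p.length : Int) ((p.length : Int) + (q.length : Int)) 1).foldl
        (pvSubstStep old new) (p ++ (q ++ r))
    = p ++ (q.map (fun t => PySem.Str.replace t old new) ++ r) := by
  induction q generalizing p with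
  | nil => simp [PySem.List.pyRange_one_eq_nil]
  | cons x q' ih =>
    rw [PySem.List.pyRange_one_cons (by simp), List.foldl_cons]
    have hlt : p.length < (p ++ (x :: q' ++ r)).length := by simp
    have hpop : PySem.List.pop? (p ++ (x :: q' ++ r)) (p.length : Int) = some (x, p ++ (q' ++ r)) := by
      rw [PySem.List.pop?_natCast _ _ hlt]
      congr 1
      refine Prod.ext ?_ ?_
      · simp [List.getElem_append_right]
      · simp [List.eraseIdx_eq_take_drop_succ, List.drop_append]
    have hins : PySem.List.insert (p ++ (q' ++ r)) (p.length : Int) (PySem.Str.replace x old new)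
        = (p ++ [PySem.Str.replace x old new]) ++ (q' ++ r) := by
      rw [PySem.List.insert_natCast _ _ _ (by simp)]
      simp
    have hstep : pvSubstStep old new (p ++ (x :: q' ++ r)) (p.length : Int)
        = (p ++ [PySem.Str.replace x old new]) ++ (q' ++ r) := by
      unfold pvSubstStep
      rw [hpop]
      exact hins
    rw [hstep]
    have hre : PySem.List.pyRange ((p.length : Int) + 1) ((p.length : Int) + ((x :: q').length : Int)) 1
        = PySem.List.pyRange (((p ++ [PySem.Str.replace x old new]).length : Int))
            (((p ++ [PySem.Str.replace x old new]).length : Int) + ((q'.length : Int))) 1 := by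
      congr 1
      · simp
      · simp
        omega
    rw [hre, ih]
    simp

theorem pvMain (num_decks : Int) : get_cards num_decks = get_cards_alt num_decks := by
  by_cases hn : num_decks ≤ 0
  · simp only [get_cards, get_cards_alt]
    rw [PySem.List.pyRange_one_eq_nil hn,
        PySem.List.pyRange_one_eq_nil (by omega : num_decks * 36 ≤ num_decks * 32),
        PySem.List.pyRange_one_eq_nil (by omega : num_decks * 48 ≤ num_decks * 44),
        PySem.List.pyRange_one_eq_nil (by omega : num_decks * 52 ≤ num_decks * 48)]
    have h0 : (PySem.List.sorted ([] : List String) (fun x => x) false) = [] :=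
      (PySem.List.sorted_eq_nil_iff _ _ _).mpr rfl
    simp only [List.foldl_nil]
    rw [h0]
    simp
  · have hn' : 0 < num_decks := by omega
    obtain ⟨m, rfl⟩ : ∃ m : Nat, num_decks = (m : Int) := ⟨num_decks.toNat, (Int.toNat_of_nonneg hn'.le).symm⟩
    simp only [get_cards, get_cards_alt]
    have hconst : ∀ lab : String, (PySem.List.pyRange 0 ((m : Int)) 1).map (fun _ => lab) = List.replicate m lab := by
      intro lab
      rw [PySem.List.pyRange_one, List.map_map]
      simp [Function.comp_def, List.map_const']
    have hB : pvLabels.flatMap (fun lab => (PySem.List.pyRange 0 ((m : Int)) 1).map (fun _ => lab)) = pvRep m pvLabels := by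
      unfold pvRep
      simp only [hconst]
    rw [hB]
    have hdeck : ((PySem.List.pyRange 2 10 1).foldl (fun acc i => acc ++ [PySem.Int.toStr i]) [] ++ (["B", "J", "Q", "T", "Z"] : List String)).foldl (fun cd i => (["C", "D", "H", "S"] : List String).foldl (fun cd2 j => cd2 ++ [i ++ j]) cd) [] = pvL52 := by decide
    rw [hdeck, PySem.List.foldl_append_eq_flatMap, List.nil_append, pvFlatMapConst]
    have hlen : (PySem.List.pyRange 0 ((m : Int)) 1).length = m := by
      rw [PySem.List.length_pyRange_one]; omega
    rw [hlen,
        PySem.List.sorted_id_eq_of_perm_of_pairwise _ (pvRep m pvL52)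
          (pvRep_perm_flatten m pvL52) (pvRep_pairwise_le m pvL52 pvL52_lt)]
    have l32 : pvN32.length = 32 := rfl
    have l4B : pvLB.length = 4 := rfl
    have l44 : pvPre44.length = 44 := rfl
    have l4T : pvLT.length = 4 := rfl
    have l48 : pvPre48.length = 48 := rfl
    have l4Z : pvLZ.length = 4 := rfl
    have hsplit1 : pvRep m pvL52 = pvRep m pvN32 ++ (pvRep m pvLB ++ pvRep m (pvJQ ++ (pvLT ++ pvLZ))) := by
      simp [pvL52, pvRep_append]
    have hr1 : PySem.List.pyRange ((m : Int) * 32) ((m : Int) * 36) 1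
        = PySem.List.pyRange (((pvRep m pvN32).length : Int)) (((pvRep m pvN32).length : Int) + ((pvRep m pvLB).length : Int)) 1 := by
      rw [pvRep_length, pvRep_length, l32, l4B]
      congr 1 <;> push_cast <;> ring
    rw [hsplit1, hr1, pvSubstLoop, pvRep_map]
    have hmap1 : pvLB.map (fun t => PySem.Str.replace t "B" "10") = pvLB10 := by decide
    rw [hmap1]
    have hsplit2 : pvRep m pvN32 ++ (pvRep m pvLB10 ++ pvRep m (pvJQ ++ (pvLT ++ pvLZ)))
        = pvRep m pvPre44 ++ (pvRep m pvLT ++ pvRep m pvLZ) := by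
      simp [pvPre44, pvRep_append]
    have hr2 : PySem.List.pyRange ((m : Int) * 44) ((m : Int) * 48) 1
        = PySem.List.pyRange (((pvRep m pvPre44).length : Int)) (((pvRep m pvPre44).length : Int) + ((pvRep m pvLT).length : Int)) 1 := by
      rw [pvRep_length, pvRep_length, l44, l4T]
      congr 1 <;> push_cast <;> ring
    rw [hsplit2, hr2, pvSubstLoop, pvRep_map]
    have hmap2 : pvLT.map (fun t => PySem.Str.replace t "T" "K") = pvLK := by decide
    rw [hmap2]
    have hsplit3 : pvRep m pvPre44 ++ (pvRep m pvLK ++ pvRep m pvLZ)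
        = pvRep m pvPre48 ++ (pvRep m pvLZ ++ ([] : List String)) := by
      simp [pvPre48, pvRep_append]
    have hr3 : PySem.List.pyRange ((m : Int) * 48) ((m : Int) * 52) 1
        = PySem.List.pyRange (((pvRep m pvPre48).length : Int)) (((pvRep m pvPre48).length : Int) + ((pvRep m pvLZ).length : Int)) 1 := by
      rw [pvRep_length, pvRep_length, l48, l4Z]
      congr 1 <;> push_cast <;> ring
    rw [hsplit3, hr3, pvSubstLoop, pvRep_map]
    have hmap3 : pvLZ.map (fun t => PySem.Str.replace t "Z" "A") = pvLA := by decide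
    rw [hmap3]
    have hfin : pvPre48 ++ pvLA = pvLabels := by decide
    simp [← hfin, pvRep_append]

-- ===== VERDICT (by name: the statement is the Claim_ definition above) =====
theorem get_cards_spec : Claim_equal_get_cards := by
  intro num_decks _
  unfold Spec_get_cards
  exact pvMain num_decks
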